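-- pv_equiv track=rewrite | github.com/NBDsoftware/biobb_workflows | biobb_workflows/Traj_postprocessing/workflow.py | build_solvent_selection
-- ===== SOURCE A (Python) =====
-- from typing import List, Optional
--
-- def build_solvent_selection(solvent_names: List[str], ion_names: List[str]) -> str:
--     """Build a GROMACS selection string for solvent and ions groups."""
--     if solvent_names:
--         solvent_selection = f'"SOL" | {" | ".join(f"r {s}" for s in solvent_names)}'
--     else:
--         solvent_selection = '"SOL"'
--     if ion_names:
--         ions_selection = f'"Ion" | {" | ".join(f"a {i}" for i in ion_names)}'
--     else:
--         ions_selection = '"Ion"'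
--     return f'{solvent_selection} | {ions_selection}'
-- ===== SOURCE B (Python) =====
-- from typing import List
--
-- def build_solvent_selection(solvent_names: List[str], ion_names: List[str]) -> str:
--     """Build a GROMACS selection string for solvent and ions groups."""
--     out = '"SOL"'
--     for s in solvent_names:
--         out += ' | r ' + s
--     out += ' | "Ion"'
--     for i in ion_names:
--         out += ' | a ' + i
--     return out
-- ===== Notes on version B (the rewrite author's own statement) =====
-- stated objective: simpler
-- what changed: Replaces the two guarded branch assignments with nested f-string joins by a single-pass string accumulator: start with '"SOL"', append ' | r <s>' per solvent, then ' | "Ion"', then ' | a <i>' per ion; no join, no token list, no emptiness checks.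
import Mathlib
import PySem

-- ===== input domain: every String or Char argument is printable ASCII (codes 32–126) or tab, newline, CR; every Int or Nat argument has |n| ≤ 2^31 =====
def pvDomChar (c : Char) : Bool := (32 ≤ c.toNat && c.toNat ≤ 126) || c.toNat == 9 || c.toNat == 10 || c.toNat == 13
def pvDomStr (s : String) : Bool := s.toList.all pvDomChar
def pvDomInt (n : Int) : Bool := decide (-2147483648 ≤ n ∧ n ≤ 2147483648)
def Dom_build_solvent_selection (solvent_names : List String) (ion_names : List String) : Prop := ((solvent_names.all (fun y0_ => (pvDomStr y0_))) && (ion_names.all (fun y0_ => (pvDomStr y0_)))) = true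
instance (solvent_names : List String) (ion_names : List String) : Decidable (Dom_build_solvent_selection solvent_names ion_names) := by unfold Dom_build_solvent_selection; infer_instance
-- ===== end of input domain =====

-- B builds the string in one pass with a plain accumulator (append per element) instead of A's two guarded branches with nested joins; same output, simpler decomposition.


-- ===== PORT A =====
def build_solvent_selection (solvent_names : List String) (ion_names : List String) : String :=
  let solvent_selection :=
    if solvent_names ≠ [] then
      "\"SOL\" | " ++ PySem.Str.join " | " (solvent_names.map (fun s => "r " ++ s))
    else
      "\"SOL\""
  let ions_selection :=
    if ion_names ≠ [] then
      "\"Ion\" | " ++ PySem.Str.join " | " (ion_names.map (fun i => "a " ++ i))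
    else
      "\"Ion\""
  solvent_selection ++ " | " ++ ions_selection

-- ===== PORT B =====
def build_solvent_selection_alt (solvent_names : List String) (ion_names : List String) : String :=
  let out := "\"SOL\""
  let out := solvent_names.foldl (fun acc s => acc ++ " | r " ++ s) out
  let out := out ++ " | \"Ion\""
  ion_names.foldl (fun acc i => acc ++ " | a " ++ i) out

-- ===== PRECONDITION & SPEC =====
def Spec_build_solvent_selection (solvent_names : List String) (ion_names : List String) (out : String) : Prop := out = build_solvent_selection_alt solvent_names ion_names
instance (solvent_names : List String) (ion_names : List String) (out : String) : Decidable (Spec_build_solvent_selection solvent_names ion_names out) := by unfold Spec_build_solvent_selection; infer_instance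

-- ===== CLAIM (what is proved, stated in full; the proofs are below) =====
def Claim_equal_build_solvent_selection : Prop := ∀ (solvent_names : List String) (ion_names : List String), Dom_build_solvent_selection solvent_names ion_names → Spec_build_solvent_selection solvent_names ion_names (build_solvent_selection solvent_names ion_names)

-- ===== LEMMAS AND PROOFS =====

-- The accumulator loop, seen on character lists: it appends (mid ++ s) per element.
theorem pv_foldl_chars (mid : String) (xs : List String) :
    ∀ (acc : String),
      (xs.foldl (fun a s => a ++ mid ++ s) acc).toList
        = acc.toList ++ xs.flatMap (fun s => mid.toList ++ s.toList) := by
  induction xs with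
  | nil => intro acc; simp
  | cons x xs ih =>
      intro acc
      simp [ih, List.flatMap_cons]

-- A nonempty join, seen on character lists: head then (sep ++ elem) per tail element.
theorem pv_join_chars (sep : List Char) (x : List Char) (xs : List (List Char)) :
    PySem.Chars.join sep (x :: xs) = x ++ xs.flatMap (fun s => sep ++ s) := by
  induction xs generalizing x with
  | nil => simp [PySem.Chars.join_singleton]
  | cons y ys ih =>
      simp [PySem.Chars.join_cons_cons, ih, List.flatMap_cons, List.append_assoc]

theorem build_solvent_selection_eq (solvent_names ion_names : List String) :
    build_solvent_selection solvent_names ion_names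
      = build_solvent_selection_alt solvent_names ion_names := by
  apply String.toList_injective
  cases solvent_names with
  | nil =>
      cases ion_names with
      | nil =>
          simp [build_solvent_selection, build_solvent_selection_alt]
      | cons i is =>
          simp [build_solvent_selection, build_solvent_selection_alt,
                PySem.Str.toList_join, pv_join_chars, pv_foldl_chars, List.flatMap_map, Function.comp]
  | cons s ss =>
      cases ion_names with
      | nil =>
          simp [build_solvent_selection, build_solvent_selection_alt,
                PySem.Str.toList_join, pv_join_chars, pv_foldl_chars, List.flatMap_map, Function.comp]
      | cons i is =>
          simp [build_solvent_selection, build_solvent_selection_alt,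
                PySem.Str.toList_join, pv_join_chars, pv_foldl_chars, List.flatMap_map, Function.comp]

-- ===== VERDICT (by name: the statement is the Claim_ definition above) =====
theorem build_solvent_selection_spec : Claim_equal_build_solvent_selection := by
  intro sn inn _
  exact build_solvent_selection_eq sn inn
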